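-- pv_equiv track=rewrite | github.com/jlab/fold-grammars | Misc/Applications/RNAhybrid/RNAhybrid.py | extend_pairs_to_valid_substructure
-- ===== SOURCE A (Python) =====
-- def extend_pairs_to_valid_substructure(full_structure, pair_subset):
--     """Recursively check if some of the pairs might extend into regions not yet within the sub-structure limits"""
--
--     curr_list_of_paired_bases = sorted(list(pair_subset.keys()) + list(pair_subset.values()))
--     orig_left, orig_right = curr_list_of_paired_bases[0], curr_list_of_paired_bases[-1]
--
--     curr_left, curr_right = orig_left, orig_right
--     for i in range(orig_left, orig_right+1, 1):
--          if i in full_structure.keys():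
--              j = full_structure[i]
--              pair_subset[i] = j
--              pair_subset[j] = i
--              if j < curr_left:
--                  curr_left = j
--              if j > curr_right:
--                  curr_right = j
--
--     if (orig_left == curr_left) and (orig_right == curr_right):
--         return pair_subset
--     else:
--         for i in range(curr_left, orig_left+1, 1):
--             if i in full_structure.keys():
--                 pair_subset[i] = full_structure[i]
--         for i in range(orig_right, curr_right+1, 1):
--             if i in full_structure.keys():
--                 pair_subset[full_structure[i]] = i
--
--         return extend_pairs_to_valid_substructure(full_structure, pair_subset)
-- ===== SOURCE B (Python) =====
-- def extend_pairs_to_valid_substructure(full_structure, pair_subset):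
--     """Iterative interval expansion: scan only the sorted keys of full_structure that
--     fall inside the current interval (never the whole integer range), insert the pairs
--     in one pass and take the new bounds from the partners in a second."""
--     ks = sorted(full_structure)
--     while True:
--         bases = list(pair_subset.keys()) + list(pair_subset.values())
--         orig_left, orig_right = min(bases), max(bases)
--         sel = [k for k in ks if orig_left <= k <= orig_right]
--         for i in sel:
--             j = full_structure[i]
--             pair_subset[i] = j
--             pair_subset[j] = i
--         partners = [full_structure[i] for i in sel]
--         curr_left = min([orig_left] + partners)
--         curr_right = max([orig_right] + partners)
--         if orig_left == curr_left and orig_right == curr_right: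
--             return pair_subset
--         for i in [k for k in ks if curr_left <= k <= orig_left]:
--             pair_subset[i] = full_structure[i]
--         for i in [k for k in ks if orig_right <= k <= curr_right]:
--             pair_subset[full_structure[i]] = i
-- ===== Notes on version B (the rewrite author's own statement) =====
-- stated objective: alternative
-- what changed: B replaces A's recursive re-scan over every integer of the interval (membership-testing each one) by an iterative loop over the sorted key list of full_structure restricted to the current interval, with the pair insertions and the new interval bounds (min/max over the partners) computed in separate single passes.
import Mathlib
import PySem

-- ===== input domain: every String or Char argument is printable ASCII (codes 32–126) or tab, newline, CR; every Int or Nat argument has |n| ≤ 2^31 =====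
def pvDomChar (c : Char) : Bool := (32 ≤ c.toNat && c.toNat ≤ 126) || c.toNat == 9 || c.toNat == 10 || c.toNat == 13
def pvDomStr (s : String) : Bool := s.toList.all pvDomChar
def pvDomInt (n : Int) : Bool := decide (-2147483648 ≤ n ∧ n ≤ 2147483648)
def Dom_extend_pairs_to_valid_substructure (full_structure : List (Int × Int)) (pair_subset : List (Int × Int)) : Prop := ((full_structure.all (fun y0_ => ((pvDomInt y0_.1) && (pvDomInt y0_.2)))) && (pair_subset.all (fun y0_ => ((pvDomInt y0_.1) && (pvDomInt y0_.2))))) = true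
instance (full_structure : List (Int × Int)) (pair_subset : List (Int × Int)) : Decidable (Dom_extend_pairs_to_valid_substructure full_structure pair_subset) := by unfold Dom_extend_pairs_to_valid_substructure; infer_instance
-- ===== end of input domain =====

-- B replaces A's scan over every integer of the current interval (and its recursion) by
-- single passes over the sorted key list of full_structure restricted to the interval.
-- The mutation of pair_subset is not modelled: the proof is about the RETURN value
-- (B performs the same insertions, so the observable mutation is the same dict anyway).
-- Both ports run the shared round loop on a fuel counter that only makes it total:
-- 2*|full_structure|+2 rounds always suffice, since each recursive round strictly widens
-- the interval to a new value of full_structure, once per side per value.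

-- ===== PORT A =====
def pvRoundsA (full : PySem.Dict Int Int) : Nat → PySem.Dict Int Int → PySem.Dict Int Int
  | 0, pair => pair
  | fuel+1, pair =>
    -- curr_list_of_paired_bases = sorted(list(pair_subset.keys()) + list(pair_subset.values()))
    let curr_list := PySem.List.sorted (pair.keys ++ pair.values) (fun x => x) false
    -- orig_left, orig_right = curr_list[0], curr_list[-1]  (IndexError on empty → outside Pre_)
    let orig_left := (PySem.List.pyGet? curr_list 0).getD 0
    let orig_right := (PySem.List.pyGet? curr_list (-1)).getD 0
    -- for i in range(orig_left, orig_right+1, 1): if i in full: …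
    let st := (PySem.List.pyRange orig_left (orig_right+1) 1).foldl
      (fun (st : PySem.Dict Int Int × Int × Int) i =>
        match full.get? i with
        | some j =>
          let p := (st.1.insert i j).insert j i
          let cl := if j < st.2.1 then j else st.2.1
          let cr := if st.2.2 < j then j else st.2.2
          (p, cl, cr)
        | none => st) (pair, orig_left, orig_right)
    let pair' := st.1
    let curr_left := st.2.1
    let curr_right := st.2.2
    if orig_left = curr_left ∧ orig_right = curr_right then pair'
    else
      -- for i in range(curr_left, orig_left+1, 1): if i in full: pair_subset[i] = full[i]
      let p2 := (PySem.List.pyRange curr_left (orig_left+1) 1).foldl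
        (fun (p : PySem.Dict Int Int) i =>
          match full.get? i with
          | some j => p.insert i j
          | none => p) pair'
      -- for i in range(orig_right, curr_right+1, 1): if i in full: pair_subset[full[i]] = i
      let p3 := (PySem.List.pyRange orig_right (curr_right+1) 1).foldl
        (fun (p : PySem.Dict Int Int) i =>
          match full.get? i with
          | some j => p.insert j i
          | none => p) p2
      pvRoundsA full fuel p3

def extend_pairs_to_valid_substructure (full_structure : List (Int × Int)) (pair_subset : List (Int × Int)) : List (Int × Int) :=
  (pvRoundsA (PySem.Dict.ofList full_structure) (2 * full_structure.length + 2)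
    (PySem.Dict.ofList pair_subset)).items

-- ===== PORT B =====
def pvRoundsB (full : PySem.Dict Int Int) (ks : List Int) : Nat → PySem.Dict Int Int → PySem.Dict Int Int
  | 0, pair => pair
  | fuel+1, pair =>
    -- bases = list(pair_subset.keys()) + list(pair_subset.values())
    let bases := pair.keys ++ pair.values
    let orig_left := (PySem.List.min? bases (fun x => x)).getD 0
    let orig_right := (PySem.List.max? bases (fun x => x)).getD 0
    -- sel = [k for k in ks if orig_left <= k <= orig_right]
    let sel := ks.filter (fun k => decide (orig_left ≤ k) && decide (k ≤ orig_right))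
    -- for i in sel: j = full[i]; pair[i] = j; pair[j] = i   (i is always a key: getD never defaults)
    let pair' := sel.foldl (fun (p : PySem.Dict Int Int) i =>
        let j := PySem.Dict.getD full i 0
        (p.insert i j).insert j i) pair
    -- partners = [full[i] for i in sel]
    let partners := sel.map (fun i => PySem.Dict.getD full i 0)
    let curr_left := (PySem.List.min? (orig_left :: partners) (fun x => x)).getD 0
    let curr_right := (PySem.List.max? (orig_right :: partners) (fun x => x)).getD 0
    if orig_left = curr_left ∧ orig_right = curr_right then pair'
    else
      let p2 := (ks.filter (fun k => decide (curr_left ≤ k) && decide (k ≤ orig_left))).foldl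
        (fun (p : PySem.Dict Int Int) i => p.insert i (PySem.Dict.getD full i 0)) pair'
      let p3 := (ks.filter (fun k => decide (orig_right ≤ k) && decide (k ≤ curr_right))).foldl
        (fun (p : PySem.Dict Int Int) i => p.insert (PySem.Dict.getD full i 0) i) p2
      pvRoundsB full ks fuel p3

def extend_pairs_to_valid_substructure_alt (full_structure : List (Int × Int)) (pair_subset : List (Int × Int)) : List (Int × Int) :=
  let full := PySem.Dict.ofList full_structure
  let ks := PySem.List.sorted full.keys (fun x => x) false
  (pvRoundsB full ks (2 * full_structure.length + 2) (PySem.Dict.ofList pair_subset)).items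

-- ===== PRECONDITION & SPEC =====
-- Pre_ excludes exactly the inputs where the Python A raises: an empty pair_subset
-- (curr_list_of_paired_bases[0] is an IndexError there).
def Pre_extend_pairs_to_valid_substructure (full_structure : List (Int × Int)) (pair_subset : List (Int × Int)) : Prop :=
  pair_subset ≠ []
instance (full_structure : List (Int × Int)) (pair_subset : List (Int × Int)) : Decidable (Pre_extend_pairs_to_valid_substructure full_structure pair_subset) := by unfold Pre_extend_pairs_to_valid_substructure; infer_instance

def pvWitness_extend_pairs_to_valid_substructure : (List (Int × Int)) × (List (Int × Int)) :=
  ([(6, 9), (9, 6), (7, 3), (3, 7)], [(6, 9)])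

def Spec_extend_pairs_to_valid_substructure (full_structure : List (Int × Int)) (pair_subset : List (Int × Int)) (out : List (Int × Int)) : Prop := out = extend_pairs_to_valid_substructure_alt full_structure pair_subset
instance (full_structure : List (Int × Int)) (pair_subset : List (Int × Int)) (out : List (Int × Int)) : Decidable (Spec_extend_pairs_to_valid_substructure full_structure pair_subset out) := by unfold Spec_extend_pairs_to_valid_substructure; infer_instance

-- ===== CLAIM (what is proved, stated in full; the proofs are below) =====
def Claim_equal_extend_pairs_to_valid_substructure : Prop := ∀ (full_structure : List (Int × Int)) (pair_subset : List (Int × Int)), Dom_extend_pairs_to_valid_substructure full_structure pair_subset → Pre_extend_pairs_to_valid_substructure full_structure pair_subset → Spec_extend_pairs_to_valid_substructure full_structure pair_subset (extend_pairs_to_valid_substructure full_structure pair_subset)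

-- ===== LEMMAS AND PROOFS =====

-- two strictly increasing integer lists with the same members coincide
lemma pv_eq_of_pairwise_lt_of_mem_iff (l₁ l₂ : List Int)
    (h₁ : l₁.Pairwise (· < ·)) (h₂ : l₂.Pairwise (· < ·))
    (hm : ∀ x, x ∈ l₁ ↔ x ∈ l₂) : l₁ = l₂ := by
  have n₁ : l₁.Nodup := h₁.imp ne_of_lt
  have n₂ : l₂.Nodup := h₂.imp ne_of_lt
  have hp : l₁.Perm l₂ := (List.perm_ext_iff_of_nodup n₁ n₂).mpr hm
  have e1 := PySem.List.sorted_eq_of_perm_of_pairwise_lt (xs := l₂) (ys := l₁) (key := fun x => x) hp h₁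
  have e2 := PySem.List.sorted_eq_of_perm_of_pairwise_lt (xs := l₂) (ys := l₂) (key := fun x => x) (List.Perm.refl _) h₂
  rw [e2] at e1; exact e1.symm

-- a fold whose body is the identity off p may be restricted to the filter
lemma pv_foldl_eq_foldl_filter {α σ : Type} (l : List α) (f : σ → α → σ) (p : α → Bool) (s : σ)
    (h : ∀ s a, p a = false → f s a = s) : l.foldl f s = (l.filter p).foldl f s := by
  induction l generalizing s with
  | nil => rfl
  | cons a t ih =>
    by_cases hp : p a = true
    · simp [hp, ih]
    · simp only [Bool.not_eq_true] at hp
      simp [hp, h s a hp, ih]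

-- every element of a ≤-sorted list is at most its last element
lemma pv_le_getLast (s : List Int) (hp : s.Pairwise (· ≤ ·)) (h : s ≠ []) :
    ∀ y ∈ s, y ≤ s.getLast h := by
  induction s with
  | nil => simp
  | cons a t ih =>
    have hpt := List.Pairwise.of_cons hp
    have ha := (List.pairwise_cons.mp hp).1
    intro y hy
    rcases t.eq_nil_or_concat with rfl | _
    · simp at hy; simp [hy]
    · have ht : t ≠ [] := by rename_i hc; rcases hc with ⟨l, x, rfl⟩; simp
      rw [List.getLast_cons ht]
      rcases List.mem_cons.mp hy with rfl | hyt
      · exact le_trans (ha _ (List.getLast_mem ht)) le_rfl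
      · exact ih hpt ht y hyt

-- sorted(xs)[0] is min(xs)  (value-wise, Int)
lemma pv_sorted_head_eq_min (l : List Int) :
    ((PySem.List.pyGet? (PySem.List.sorted l (fun x => x) false) 0).getD 0)
      = ((PySem.List.min? l (fun x => x)).getD 0) := by
  rcases hs : PySem.List.sorted l (fun x => x) false with _ | ⟨m, t⟩
  · have : l = [] := (PySem.List.sorted_eq_nil_iff l (fun x => x) false).mp hs
    subst this; rfl
  · have hl : l ≠ [] := by
      intro h; subst h; exact absurd hs (by simp [PySem.List.sorted])
    rcases hmin : PySem.List.min? l (fun x => x) with _ | mv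
    · exact absurd ((PySem.List.min?_eq_none_iff l (fun x => x)).mp hmin) hl
    have h1 : ∀ y ∈ l, m ≤ y := PySem.List.key_head_sorted_le l (fun x => x) hs
    have h2 : ∀ y ∈ l, mv ≤ y := PySem.List.min?_isMin hmin
    have hm_mem : m ∈ l := (PySem.List.mem_sorted _ _ _ _).mp (by rw [hs]; exact List.mem_cons_self)
    have hmv_mem : mv ∈ l := PySem.List.min?_mem hmin
    have : m = mv := le_antisymm (h1 mv hmv_mem) (h2 m hm_mem)
    simp [this]

-- sorted(xs)[-1] is max(xs)  (value-wise, Int)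
lemma pv_sorted_last_eq_max (l : List Int) :
    ((PySem.List.pyGet? (PySem.List.sorted l (fun x => x) false) (-1)).getD 0)
      = ((PySem.List.max? l (fun x => x)).getD 0) := by
  rcases hs : PySem.List.sorted l (fun x => x) false with _ | ⟨m, t⟩
  · have : l = [] := (PySem.List.sorted_eq_nil_iff l (fun x => x) false).mp hs
    subst this; rfl
  · have hl : l ≠ [] := by
      intro h; subst h; exact absurd hs (by simp [PySem.List.sorted])
    rcases hmax : PySem.List.max? l (fun x => x) with _ | mv
    · exact absurd ((PySem.List.max?_eq_none_iff l (fun x => x)).mp hmax) hl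
    have h2 : ∀ y ∈ l, y ≤ mv := PySem.List.max?_isMax hmax
    have hpair : (m :: t).Pairwise (fun a b => a ≤ b) := by
      have := PySem.List.sorted_pairwise l (fun x => x)
      rwa [hs] at this
    have hne : (m :: t) ≠ [] := by simp
    have hlast_mem : (m :: t).getLast hne ∈ l := by
      have : (m :: t).getLast hne ∈ PySem.List.sorted l (fun x => x) false := by
        rw [hs]; exact List.getLast_mem hne
      exact (PySem.List.mem_sorted _ _ _ _).mp this
    have h1 : ∀ y ∈ l, y ≤ (m :: t).getLast hne := by
      intro y hy
      have hy' : y ∈ (m :: t) := by rw [← hs]; exact (PySem.List.mem_sorted _ _ _ _).mpr hy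
      exact pv_le_getLast _ hpair hne y hy'
    have hq : (m :: t).getLast hne = mv :=
      le_antisymm (h2 _ hlast_mem) (h1 mv (PySem.List.max?_mem hmax))
    rw [PySem.List.pyGet?_neg_one]
    simp [List.getLast?_eq_some_getLast hne, hq]

-- A's integer-range scan guarded by key membership visits exactly B's restricted key list
lemma pv_range_filter_eq_keys_filter (full : PySem.Dict Int Int) (L R : Int)
    (hnd : (PySem.Dict.keys full).Nodup) :
    (PySem.List.pyRange L (R+1) 1).filter (fun i => PySem.Dict.contains full i)
      = (PySem.List.sorted (PySem.Dict.keys full) (fun x => x) false).filter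
          (fun k => decide (L ≤ k) && decide (k ≤ R)) := by
  apply pv_eq_of_pairwise_lt_of_mem_iff
  · exact (PySem.List.pairwise_lt_pyRange_one L (R+1)).filter _
  · have hperm := PySem.List.sorted_perm (PySem.Dict.keys full) (fun x => x) false
    have hnd' : (PySem.List.sorted (PySem.Dict.keys full) (fun x => x) false).Nodup :=
      hperm.nodup_iff.mpr hnd
    have hle := PySem.List.sorted_pairwise (PySem.Dict.keys full) (fun x => x)
    exact ((hle.and hnd').imp (fun h => lt_of_le_of_ne h.1 h.2)).filter _
  · intro x
    simp only [List.mem_filter, PySem.List.mem_pyRange_one, PySem.List.mem_sorted,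
      PySem.Dict.contains_iff_mem_keys, Bool.and_eq_true, decide_eq_true_eq]
    constructor
    · rintro ⟨⟨ha, hb⟩, hc⟩; exact ⟨hc, ha, by omega⟩
    · rintro ⟨hc, ha, hb⟩; exact ⟨⟨ha, by omega⟩, hc⟩

-- a fold of a componentwise triple body splits into three independent folds
lemma pv_foldl_split3 {α : Type} (l : List α) (fd : PySem.Dict Int Int → α → PySem.Dict Int Int)
    (fc fr : Int → α → Int) (p0 : PySem.Dict Int Int) (c0 r0 : Int) :
    l.foldl (fun (st : PySem.Dict Int Int × Int × Int) i => (fd st.1 i, fc st.2.1 i, fr st.2.2 i)) (p0, c0, r0)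
      = (l.foldl fd p0, l.foldl fc c0, l.foldl fr r0) := by
  induction l generalizing p0 c0 r0 with
  | nil => rfl
  | cons a t ih => simp [ih]

-- every element of sel is a key of full
lemma pv_mem_sel_get? (full : PySem.Dict Int Int) (_hnd : (PySem.Dict.keys full).Nodup)
    (L R : Int) (i : Int)
    (hi : i ∈ (PySem.List.sorted (PySem.Dict.keys full) (fun x => x) false).filter
          (fun k => decide (L ≤ k) && decide (k ≤ R))) :
    PySem.Dict.get? full i = some (PySem.Dict.getD full i 0) := by
  have hk : i ∈ PySem.Dict.keys full :=
    (PySem.List.mem_sorted _ _ _ _).mp (List.mem_of_mem_filter hi)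
  have hc : PySem.Dict.contains full i = true := (PySem.Dict.contains_iff_mem_keys _ _).mpr hk
  rcases hg : PySem.Dict.get? full i with _ | v
  · rw [PySem.Dict.contains_eq_isSome_get?, hg] at hc; simp at hc
  · rw [PySem.Dict.getD_eq_get?_getD, hg]; rfl

-- one round (and hence the whole loop) of A equals one round of B, for every fuel
lemma pv_roundsA_eq_roundsB (full : PySem.Dict Int Int)
    (hnd : (PySem.Dict.keys full).Nodup) (fuel : Nat) (pair : PySem.Dict Int Int) :
    pvRoundsA full fuel pair
      = pvRoundsB full (PySem.List.sorted (PySem.Dict.keys full) (fun x => x) false) fuel pair := by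
  induction fuel generalizing pair with
  | zero => rfl
  | succ fuel ih =>
    rw [pvRoundsA, pvRoundsB]
    simp only [pv_sorted_head_eq_min, pv_sorted_last_eq_max]
    set L := (PySem.List.min? (pair.keys ++ pair.values) (fun x => x)).getD 0 with hL
    set R := (PySem.List.max? (pair.keys ++ pair.values) (fun x => x)).getD 0 with hR
    set ks := PySem.List.sorted (PySem.Dict.keys full) (fun x => x) false with hks
    set sel := ks.filter (fun k => decide (L ≤ k) && decide (k ≤ R)) with hsel
    -- main loop: restrict to the keys in the interval, then split the triple state
    have hmain :
        (PySem.List.pyRange L (R+1) 1).foldl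
          (fun (st : PySem.Dict Int Int × Int × Int) i =>
            match full.get? i with
            | some j =>
              let p := (st.1.insert i j).insert j i
              let cl := if j < st.2.1 then j else st.2.1
              let cr := if st.2.2 < j then j else st.2.2
              (p, cl, cr)
            | none => st) (pair, L, R)
        = (sel.foldl (fun (p : PySem.Dict Int Int) i =>
              let j := PySem.Dict.getD full i 0
              (p.insert i j).insert j i) pair,
           (PySem.List.min? (L :: sel.map (fun i => PySem.Dict.getD full i 0)) (fun x => x)).getD 0,
           (PySem.List.max? (R :: sel.map (fun i => PySem.Dict.getD full i 0)) (fun x => x)).getD 0) := by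
      rw [pv_foldl_eq_foldl_filter _ _ (fun i => PySem.Dict.contains full i) _ (by
        intro s a hca
        rcases hg : PySem.Dict.get? full a with _ | v
        · rfl
        · simp [PySem.Dict.contains_eq_isSome_get?, hg] at hca)]
      rw [pv_range_filter_eq_keys_filter full L R hnd, ← hks, ← hsel]
      have hsplit :
          (fun (st : PySem.Dict Int Int × Int × Int) i =>
            match full.get? i with
            | some j =>
              let p := (st.1.insert i j).insert j i
              let cl := if j < st.2.1 then j else st.2.1
              let cr := if st.2.2 < j then j else st.2.2
              (p, cl, cr)
            | none => st)
          = (fun (st : PySem.Dict Int Int × Int × Int) i =>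
              ((match full.get? i with
                | some j => (st.1.insert i j).insert j i
                | none => st.1),
               (match full.get? i with
                | some j => if j < st.2.1 then j else st.2.1
                | none => st.2.1),
               (match full.get? i with
                | some j => if st.2.2 < j then j else st.2.2
                | none => st.2.2))) := by
        funext st i
        rcases PySem.Dict.get? full i with _ | v <;> rfl
      rw [hsplit, pv_foldl_split3 sel
        (fun p i => match full.get? i with
          | some j => (p.insert i j).insert j i
          | none => p)
        (fun c i => match full.get? i with
          | some j => if j < c then j else c
          | none => c)
        (fun r i => match full.get? i with
          | some j => if r < j then j else r
          | none => r)]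
      refine congrArg₂ _ ?_ (congrArg₂ _ ?_ ?_)
      · refine PySem.List.foldl_congr_mem _ _ _ _ ?_
        intro acc x hx
        rw [pv_mem_sel_get? full hnd L R x hx]
      · rw [PySem.List.min?_id_cons, Option.getD_some, List.foldl_map]
        refine (PySem.List.foldl_congr_mem _ _ _ _ ?_).symm
        intro acc x hx
        rw [pv_mem_sel_get? full hnd L R x hx]
        simp only [min_def]
        split_ifs <;> omega
      · rw [PySem.List.max?_id_cons, Option.getD_some, List.foldl_map]
        refine (PySem.List.foldl_congr_mem _ _ _ _ ?_).symm
        intro acc x hx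
        rw [pv_mem_sel_get? full hnd L R x hx]
        simp only [max_def]
        split_ifs <;> omega
    rw [hmain]
    set cl := (PySem.List.min? (L :: sel.map (fun i => PySem.Dict.getD full i 0)) (fun x => x)).getD 0 with hcl
    set cr := (PySem.List.max? (R :: sel.map (fun i => PySem.Dict.getD full i 0)) (fun x => x)).getD 0 with hcr
    by_cases hcond : L = cl ∧ R = cr
    · simp [hcond]
    · simp only [if_neg hcond]
      -- the two fix-up loops, then the recursive call via the induction hypothesis
      have hfix1 : ∀ (d : PySem.Dict Int Int),
          (PySem.List.pyRange cl (L+1) 1).foldl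
            (fun (p : PySem.Dict Int Int) i =>
              match full.get? i with
              | some j => p.insert i j
              | none => p) d
          = (ks.filter (fun k => decide (cl ≤ k) && decide (k ≤ L))).foldl
              (fun (p : PySem.Dict Int Int) i => p.insert i (PySem.Dict.getD full i 0)) d := by
        intro d
        rw [pv_foldl_eq_foldl_filter _ _ (fun i => PySem.Dict.contains full i) _ (by
          intro s a hca
          rcases hg : PySem.Dict.get? full a with _ | v
          · rfl
          · simp [PySem.Dict.contains_eq_isSome_get?, hg] at hca)]
        rw [pv_range_filter_eq_keys_filter full cl L hnd, ← hks]
        refine PySem.List.foldl_congr_mem _ _ _ _ ?_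
        intro acc x hx
        rw [pv_mem_sel_get? full hnd cl L x hx]
      have hfix2 : ∀ (d : PySem.Dict Int Int),
          (PySem.List.pyRange R (cr+1) 1).foldl
            (fun (p : PySem.Dict Int Int) i =>
              match full.get? i with
              | some j => p.insert j i
              | none => p) d
          = (ks.filter (fun k => decide (R ≤ k) && decide (k ≤ cr))).foldl
              (fun (p : PySem.Dict Int Int) i => p.insert (PySem.Dict.getD full i 0) i) d := by
        intro d
        rw [pv_foldl_eq_foldl_filter _ _ (fun i => PySem.Dict.contains full i) _ (by
          intro s a hca
          rcases hg : PySem.Dict.get? full a with _ | v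
          · rfl
          · simp [PySem.Dict.contains_eq_isSome_get?, hg] at hca)]
        rw [pv_range_filter_eq_keys_filter full R cr hnd, ← hks]
        refine PySem.List.foldl_congr_mem _ _ _ _ ?_
        intro acc x hx
        rw [pv_mem_sel_get? full hnd R cr x hx]
      rw [hfix1, hfix2, ih]

-- ===== VERDICT (by name: the statement is the Claim_ definition above) =====
theorem extend_pairs_to_valid_substructure_spec : Claim_equal_extend_pairs_to_valid_substructure := by
  intro fs ps _ _
  unfold Spec_extend_pairs_to_valid_substructure
  unfold extend_pairs_to_valid_substructure extend_pairs_to_valid_substructure_alt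
  rw [pv_roundsA_eq_roundsB _ (PySem.Dict.nodup_keys_ofList fs)]
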